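-- pv_equiv track=rewrite | github.com/sssungjin/Algorithm | 프로그래머스/3/132266. 부대복귀/부대복귀.py | solution
-- ===== SOURCE A (Python) =====
-- from collections import deque
--
-- def solution(n, roads, sources, destination):
--     answer = []
--     # sources 값이 destination에 갈 수 있는지, 가는 비용 answer에 저장, 못가면 -1
--     graph = [[] for _ in range(n + 1)]
--     for a, b in roads:
--         graph[a].append(b)
--         graph[b].append(a)
--
--     distances = [-1] * (n + 1)
--
--     queue = deque([destination])
--     distances[destination] = 0
--
--
--
--     while queue:
--         now = queue.popleft()
--
--         for i in graph[now]:
--             if distances[i] == -1: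
--                 distances[i] = distances[now] + 1
--                 queue.append(i)
--
--     for s in sources:
--         answer.append(distances[s])
--
--     return answer
-- ===== SOURCE B (Python) =====
-- def solution(n, roads, sources, destination):
--     # Edge-centric level-synchronous relaxation (Bellman-Ford style): no adjacency
--     # list and no queue; each round scans the raw edge list and assigns distance d
--     # to any still-unreached endpoint adjacent to a node at distance d-1.
--     dist = [-1] * (n + 1)
--     dist[destination] = 0
--     d = 0
--     changed = True
--     while changed:
--         d += 1
--         changed = False
--         for a, b in roads:
--             if dist[a] == d - 1 and dist[b] == -1:
--                 dist[b] = d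
--                 changed = True
--             if dist[b] == d - 1 and dist[a] == -1:
--                 dist[a] = d
--                 changed = True
--     return [dist[s] for s in sources]
-- ===== Notes on version B (the rewrite author's own statement) =====
-- stated objective: alternative
-- what changed: Replaces the queue-based BFS over an adjacency list by edge-centric level-synchronous relaxation (Bellman-Ford style): no adjacency list and no queue are built; each round scans the raw road list and assigns distance d to any unreached endpoint adjacent to a distance-(d-1) node, stopping when a round changes nothing.
import Mathlib
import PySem

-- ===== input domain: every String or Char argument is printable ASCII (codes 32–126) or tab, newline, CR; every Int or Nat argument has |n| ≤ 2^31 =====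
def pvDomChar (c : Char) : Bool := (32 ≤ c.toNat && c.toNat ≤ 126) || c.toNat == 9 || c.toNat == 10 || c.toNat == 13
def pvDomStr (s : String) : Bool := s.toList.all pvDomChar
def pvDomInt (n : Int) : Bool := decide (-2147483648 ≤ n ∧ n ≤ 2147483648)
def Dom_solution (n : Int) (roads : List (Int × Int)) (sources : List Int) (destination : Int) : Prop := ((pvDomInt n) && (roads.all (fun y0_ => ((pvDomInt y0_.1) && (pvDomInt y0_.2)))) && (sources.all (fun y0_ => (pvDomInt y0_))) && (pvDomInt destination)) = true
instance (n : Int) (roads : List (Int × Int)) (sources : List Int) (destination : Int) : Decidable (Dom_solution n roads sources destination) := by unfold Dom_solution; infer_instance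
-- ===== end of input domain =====

-- B replaces A's queue BFS over an adjacency list by edge-centric level-synchronous
-- relaxation (Bellman-Ford style) over the raw road list; same results on the stated domain.

-- ===== PORT A =====
-- graph = [[] for _ in range(n+1)]; for a, b in roads: graph[a].append(b); graph[b].append(a)
def pvBuildGraph (n : Int) (roads : List (Int × Int)) : List (List Int) :=
  roads.foldl (fun g r =>
    let g1 := PySem.List.pySetD g r.1 (PySem.List.pyGetD g r.1 [] ++ [r.2])
    PySem.List.pySetD g1 r.2 (PySem.List.pyGetD g1 r.2 [] ++ [r.1]))
    (List.replicate (n + 1).toNat ([] : List Int))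

-- while queue: now = queue.popleft(); for i in graph[now]: if distances[i] == -1: … (fuel only guards totality)
def pvLoopA (graph : List (List Int)) : Nat → List Int → List Int → List Int
  | 0, dist, _ => dist
  | _ + 1, dist, [] => dist
  | fuel + 1, dist, now :: rest =>
      let st := (PySem.List.pyGetD graph now []).foldl
        (fun (st : List Int × List Int) i =>
          if PySem.List.pyGetD st.1 i 0 = -1 then
            (PySem.List.pySetD st.1 i (PySem.List.pyGetD st.1 now 0 + 1), st.2 ++ [i])
          else st) (dist, rest)
      pvLoopA graph fuel st.1 st.2

def solution (n : Int) (roads : List (Int × Int)) (sources : List Int) (destination : Int) : List Int :=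
  let graph := pvBuildGraph n roads
  let distances := PySem.List.pySetD (List.replicate (n + 1).toNat (-1 : Int)) destination 0
  let distances := pvLoopA graph ((n + 1).toNat + 1) distances [destination]
  sources.foldl (fun answer s => answer ++ [PySem.List.pyGetD distances s (-1)]) []

-- ===== PORT B =====
-- one road (a, b): if dist[a] == d-1 and dist[b] == -1: dist[b] = d; changed = True   (and symmetrically)
def pvEdgeStep (d : Int) (st : List Int × Bool) (r : Int × Int) : List Int × Bool :=
  let st1 := if PySem.List.pyGetD st.1 r.1 0 = d - 1 ∧ PySem.List.pyGetD st.1 r.2 0 = -1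
             then (PySem.List.pySetD st.1 r.2 d, true) else st
  if PySem.List.pyGetD st1.1 r.2 0 = d - 1 ∧ PySem.List.pyGetD st1.1 r.1 0 = -1
  then (PySem.List.pySetD st1.1 r.1 d, true) else st1

-- while changed: d += 1; changed = False; for a, b in roads: …  (fuel only guards totality)
def pvLoopC (roads : List (Int × Int)) : Nat → List Int → Int → List Int
  | 0, dist, _ => dist
  | fuel + 1, dist, d =>
      let st := roads.foldl (pvEdgeStep (d + 1)) (dist, false)
      if st.2 then pvLoopC roads fuel st.1 (d + 1) else st.1

def solution_alt (n : Int) (roads : List (Int × Int)) (sources : List Int) (destination : Int) : List Int :=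
  let dist := PySem.List.pySetD (List.replicate (n + 1).toNat (-1 : Int)) destination 0
  let dist := pvLoopC roads ((n + 1).toNat + 1) dist 0
  sources.map (fun s => PySem.List.pyGetD dist s (-1))

-- ===== PRECONDITION & SPEC =====
-- Pre_ is exactly where Python A returns normally: n ≥ 0 (n = -1 always raises on
-- distances[destination]) and every node label (road endpoints, sources, destination) a valid
-- Python index into the length-(n+1) arrays, i.e. in [-(n+1), n] (outside: IndexError).
def Pre_solution (n : Int) (roads : List (Int × Int)) (sources : List Int) (destination : Int) : Prop :=
  0 ≤ n ∧ (∀ r ∈ roads, -(n + 1) ≤ r.1 ∧ r.1 ≤ n ∧ -(n + 1) ≤ r.2 ∧ r.2 ≤ n) ∧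
  (∀ s ∈ sources, -(n + 1) ≤ s ∧ s ≤ n) ∧ -(n + 1) ≤ destination ∧ destination ≤ n
instance (n : Int) (roads : List (Int × Int)) (sources : List Int) (destination : Int) : Decidable (Pre_solution n roads sources destination) := by unfold Pre_solution; infer_instance

def pvWitness_solution : Int × (List (Int × Int)) × List Int × Int := (3, [(1, 2), (2, 3)], [1, 3, 0], 2)

def Spec_solution (n : Int) (roads : List (Int × Int)) (sources : List Int) (destination : Int) (out : List Int) : Prop := out = solution_alt n roads sources destination
instance (n : Int) (roads : List (Int × Int)) (sources : List Int) (destination : Int) (out : List Int) : Decidable (Spec_solution n roads sources destination out) := by unfold Spec_solution; infer_instance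

-- ===== CLAIM (what is proved, stated in full; the proofs are below) =====
def Claim_equal_solution : Prop := ∀ (n : Int) (roads : List (Int × Int)) (sources : List Int) (destination : Int), Dom_solution n roads sources destination → Pre_solution n roads sources destination → Spec_solution n roads sources destination (solution n roads sources destination)

-- ===== LEMMAS AND PROOFS =====

-- v is a valid Python index into a length-L array (negative = from the end), and its cell
def pvInR (L : Nat) (v : Int) : Prop := -(L : Int) ≤ v ∧ v < L
def pvIdx (L : Nat) (i : Int) : Nat := (if i < 0 then i + L else i).toNat

theorem pvIdx_lt {L : Nat} {i : Int} (h : pvInR L i) : pvIdx L i < L := by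
  unfold pvIdx; obtain ⟨a, b⟩ := h; split <;> omega

theorem pvGetBridge {α : Type} (xs : List α) {L : Nat} {i : Int} (d : α)
    (hL : xs.length = L) (h : pvInR L i) :
    PySem.List.pyGetD xs i d = xs[pvIdx L i]'(by rw [hL]; exact pvIdx_lt h) := by
  subst hL
  have h1 := h.1; have h2 := h.2
  unfold PySem.List.pyGetD PySem.List.pyGet? PySem.List.pyIdx?
  by_cases hp : 0 ≤ i
  · have hidx : pvIdx xs.length i = i.toNat := by unfold pvIdx; split <;> omega
    rw [if_pos hp, if_pos h2]
    simp only [hidx, Option.bind]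
    rw [List.getElem?_eq_getElem (show i.toNat < xs.length by omega)]
    rfl
  · have hidx : pvIdx xs.length i = xs.length - (-i).toNat := by unfold pvIdx; split <;> omega
    rw [if_neg hp, if_pos (by omega)]
    simp only [hidx, Option.bind]
    rw [List.getElem?_eq_getElem (show xs.length - (-i).toNat < xs.length by omega)]
    rfl

theorem pvSetBridge {α : Type} (xs : List α) {L : Nat} {i : Int} (v : α)
    (hL : xs.length = L) (h : pvInR L i) :
    PySem.List.pySetD xs i v = xs.set (pvIdx L i) v := by
  subst hL
  have h1 := h.1; have h2 := h.2
  unfold PySem.List.pySetD PySem.List.pySet? PySem.List.pyIdx?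
  by_cases hp : 0 ≤ i
  · have hidx : pvIdx xs.length i = i.toNat := by unfold pvIdx; split <;> omega
    rw [if_pos hp, if_pos h2]
    simp only [hidx]
    rfl
  · have hidx : pvIdx xs.length i = xs.length - (-i).toNat := by unfold pvIdx; split <;> omega
    rw [if_neg hp, if_pos (by omega)]
    simp only [hidx]
    rfl

theorem pvGetDBridge {α : Type} (xs : List α) {L : Nat} {i : Int} (d : α)
    (hL : xs.length = L) (h : pvInR L i) :
    PySem.List.pyGetD xs i d = xs.getD (pvIdx L i) d := by
  rw [pvGetBridge xs d hL h]
  rw [List.getD_eq_getElem xs d (by rw [hL]; exact pvIdx_lt h)]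

theorem pvGetDSet {α : Type} (xs : List α) (k j : Nat) (v d : α) (hj : j < xs.length) :
    (xs.set k v).getD j d = if k = j then v else xs.getD j d := by
  rw [List.getD_eq_getElem _ d (by simpa using hj)]
  rw [List.getElem_set]
  split
  · rfl
  · rw [List.getD_eq_getElem _ d hj]

-- number of still-unvisited (-1) cells
def pvNeg (D : List Int) : Nat := D.countP (fun x => x = -1)

-- A's inner body / B-level's assignment, as a proof-internal level-synchronous BFS
def pvStep (c : Int) (st : List Int × List Int) (v : Int) : List Int × List Int :=
  if PySem.List.pyGetD st.1 v 0 = -1 then (PySem.List.pySetD st.1 v c, st.2 ++ [v]) else st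

def pvOuter (graph : List (List Int)) (c : Int) (st : List Int × List Int) (u : Int) : List Int × List Int :=
  (PySem.List.pyGetD graph u []).foldl (pvStep c) st

def pvLoopB (graph : List (List Int)) : Nat → List Int → List Int → Int → List Int
  | 0, dist, _, _ => dist
  | _ + 1, dist, [], _ => dist
  | fuel + 1, dist, u :: q, d =>
      let d' := d + 1
      let st := (u :: q).foldl (pvOuter graph d') (dist, [])
      pvLoopB graph fuel st.1 st.2 d'

theorem pvStep_preserve {L : Nat} (c : Int) (st : List Int × List Int) (v w x : Int)
    (hL : st.1.length = L) (hv : pvInR L v) (hw : pvInR L w)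
    (hx : PySem.List.pyGetD st.1 w 0 = x) (hxne : x ≠ -1) :
    PySem.List.pyGetD (pvStep c st v).1 w 0 = x := by
  unfold pvStep; split
  · rename_i hneg
    rw [pvSetBridge st.1 c hL hv]
    rw [pvGetBridge _ 0 (by rw [List.length_set]; exact hL) hw]
    rw [pvGetBridge st.1 0 hL hw] at hx
    rw [pvGetBridge st.1 0 hL hv] at hneg
    rw [List.getElem_set]
    split
    · rename_i hvw
      have hvw' : st.1[pvIdx L v]'(by rw [hL]; exact pvIdx_lt hv)
          = st.1[pvIdx L w]'(by rw [hL]; exact pvIdx_lt hw) := by simp only [hvw]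
      rw [hvw', hx] at hneg; exact absurd hneg hxne
    · exact hx
  · exact hx

theorem pvStep_neg {L : Nat} (c : Int) (st : List Int × List Int) (v : Int)
    (hL : st.1.length = L) (hv : pvInR L v) (hc : c ≠ -1) :
    pvNeg (pvStep c st v).1 + (pvStep c st v).2.length = pvNeg st.1 + st.2.length := by
  unfold pvStep; split
  · rename_i hneg
    rw [pvGetBridge st.1 0 hL hv] at hneg
    have hlt : pvIdx L v < st.1.length := by rw [hL]; exact pvIdx_lt hv
    unfold pvNeg
    rw [pvSetBridge st.1 c hL hv, List.countP_set hlt]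
    simp only [hneg, List.length_append, List.length_singleton]
    simp [hc]
    have : 0 < st.1.countP (fun x => decide (x = -1)) := by
      rw [List.countP_pos_iff]
      exact ⟨st.1[pvIdx L v]'hlt, List.getElem_mem hlt, by simp [hneg]⟩
    omega
  · rfl

theorem pvStep_mem {L : Nat} (c : Int) (st : List Int × List Int) (v : Int)
    (hL : st.1.length = L) (hv : pvInR L v) (_hc : c ≠ -1)
    (hst : ∀ u ∈ st.2, pvInR L u ∧ PySem.List.pyGetD st.1 u 0 = c) :
    ∀ u ∈ (pvStep c st v).2, pvInR L u ∧ PySem.List.pyGetD (pvStep c st v).1 u 0 = c := by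
  intro u hu
  unfold pvStep at hu ⊢; split at hu <;> rename_i hneg
  · simp only [List.mem_append, List.mem_singleton] at hu
    rcases hu with hu | rfl
    · have := hst u hu
      refine ⟨this.1, ?_⟩
      simp only [hneg, if_pos]
      rw [pvSetBridge st.1 c hL hv]
      rw [pvGetBridge _ 0 (by rw [List.length_set]; exact hL) this.1]
      rw [List.getElem_set]
      rw [pvGetBridge st.1 0 hL this.1] at this
      split
      · rfl
      · exact this.2
    · refine ⟨hv, ?_⟩
      simp only [hneg, if_pos]
      rw [pvSetBridge st.1 c hL hv]
      rw [pvGetBridge _ 0 (by rw [List.length_set]; exact hL) hv]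
      simp
  · simp only [hneg, ite_false]
    exact hst u hu

theorem pvStep_len (c : Int) (st : List Int × List Int) (v : Int) :
    (pvStep c st v).1.length = st.1.length := by
  unfold pvStep; split <;> simp [PySem.List.length_pySetD]

theorem pvAppender_foldl {f} (hf : ∀ D acc v, f (D, acc) v = ((f (D, ([] : List Int)) v).1, acc ++ (f (D, []) v).2))
    (l : List Int) (D : List Int) (acc : List Int) :
    l.foldl f (D, acc) = ((l.foldl f (D, [])).1, acc ++ (l.foldl f (D, [])).2) := by
  induction l generalizing D acc with
  | nil => simp
  | cons v l ih =>
    simp only [List.foldl_cons]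
    rw [hf D acc v, hf D [] v]
    simp only [List.nil_append]
    rw [ih ((f (D, []) v).1) (acc ++ (f (D, []) v).2), ih ((f (D, []) v).1) ((f (D, []) v).2)]
    simp

theorem pvAppender_step (c : Int) :
    ∀ D acc v, pvStep c (D, acc) v = ((pvStep c (D, ([] : List Int)) v).1, acc ++ (pvStep c (D, []) v).2) := by
  intro D acc v; unfold pvStep; dsimp only; split <;> simp

theorem pvInner_len (c : Int) (l : List Int) (st : List Int × List Int) :
    (l.foldl (pvStep c) st).1.length = st.1.length := by
  induction l generalizing st with
  | nil => rfl
  | cons v l ih => rw [List.foldl_cons, ih, pvStep_len]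

theorem pvInner_preserve {L : Nat} (c : Int) (l : List Int) (st : List Int × List Int) (w x : Int)
    (hl : ∀ v ∈ l, pvInR L v) (hL : st.1.length = L) (hw : pvInR L w)
    (hx : PySem.List.pyGetD st.1 w 0 = x) (hxne : x ≠ -1) :
    PySem.List.pyGetD (l.foldl (pvStep c) st).1 w 0 = x := by
  induction l generalizing st with
  | nil => exact hx
  | cons v l ih =>
    rw [List.foldl_cons]
    exact ih _ (fun v hv => hl v (List.mem_cons_of_mem _ hv))
      (by rw [pvStep_len, hL])
      (pvStep_preserve c st v w x hL (hl v List.mem_cons_self) hw hx hxne)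

theorem pvInner_neg {L : Nat} (c : Int) (l : List Int) (st : List Int × List Int)
    (hl : ∀ v ∈ l, pvInR L v) (hL : st.1.length = L) (hc : c ≠ -1) :
    pvNeg (l.foldl (pvStep c) st).1 + (l.foldl (pvStep c) st).2.length = pvNeg st.1 + st.2.length := by
  induction l generalizing st with
  | nil => rfl
  | cons v l ih =>
    rw [List.foldl_cons]
    rw [ih _ (fun v hv => hl v (List.mem_cons_of_mem _ hv)) (by rw [pvStep_len, hL])]
    exact pvStep_neg c st v hL (hl v List.mem_cons_self) hc

theorem pvInner_mem {L : Nat} (c : Int) (l : List Int) (st : List Int × List Int)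
    (hl : ∀ v ∈ l, pvInR L v) (hL : st.1.length = L) (hc : c ≠ -1)
    (hst : ∀ u ∈ st.2, pvInR L u ∧ PySem.List.pyGetD st.1 u 0 = c) :
    ∀ u ∈ (l.foldl (pvStep c) st).2, pvInR L u ∧ PySem.List.pyGetD (l.foldl (pvStep c) st).1 u 0 = c := by
  induction l generalizing st with
  | nil => exact hst
  | cons v l ih =>
    rw [List.foldl_cons]
    exact ih _ (fun v hv => hl v (List.mem_cons_of_mem _ hv)) (by rw [pvStep_len, hL])
      (pvStep_mem c st v hL (hl v List.mem_cons_self) hc hst)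

theorem pvInner_A_eq_B {L : Nat} (l : List Int) (st : List Int × List Int) (now d : Int)
    (hl : ∀ v ∈ l, pvInR L v) (hL : st.1.length = L) (hnow : pvInR L now)
    (hval : PySem.List.pyGetD st.1 now 0 = d) (hd : 0 ≤ d) :
    l.foldl (fun (st : List Int × List Int) i =>
        if PySem.List.pyGetD st.1 i 0 = -1 then
          (PySem.List.pySetD st.1 i (PySem.List.pyGetD st.1 now 0 + 1), st.2 ++ [i])
        else st) st
      = l.foldl (pvStep (d + 1)) st := by
  induction l generalizing st with
  | nil => rfl
  | cons v l ih =>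
    have hstep : (if PySem.List.pyGetD st.1 v 0 = -1 then
          (PySem.List.pySetD st.1 v (PySem.List.pyGetD st.1 now 0 + 1), st.2 ++ [v])
        else st) = pvStep (d + 1) st v := by
      unfold pvStep; rw [hval]
    rw [List.foldl_cons, List.foldl_cons, hstep]
    exact ih _ (fun v hv => hl v (List.mem_cons_of_mem _ hv)) (by rw [pvStep_len, hL])
      (pvStep_preserve (d + 1) st v now d hL (hl v List.mem_cons_self) hnow hval (by omega))

theorem pvAppender_outer (graph : List (List Int)) (c : Int) :
    ∀ D acc v, pvOuter graph c (D, acc) v = ((pvOuter graph c (D, ([] : List Int)) v).1, acc ++ (pvOuter graph c (D, []) v).2) := by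
  intro D acc v
  exact pvAppender_foldl (pvAppender_step c) _ D acc

theorem pvLevel_len (graph : List (List Int)) (c : Int) (q : List Int) (st : List Int × List Int) :
    (q.foldl (pvOuter graph c) st).1.length = st.1.length := by
  induction q generalizing st with
  | nil => rfl
  | cons u q ih => rw [List.foldl_cons, ih, pvOuter]; exact pvInner_len c _ st

theorem pvLevel_neg {L : Nat} (graph : List (List Int)) (c : Int) (q : List Int)
    (st : List Int × List Int)
    (hg : ∀ u, ∀ v ∈ PySem.List.pyGetD graph u [], pvInR L v)
    (hL : st.1.length = L) (hc : c ≠ -1) :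
    pvNeg (q.foldl (pvOuter graph c) st).1 + (q.foldl (pvOuter graph c) st).2.length
      = pvNeg st.1 + st.2.length := by
  induction q generalizing st with
  | nil => rfl
  | cons u q ih =>
    rw [List.foldl_cons]
    rw [ih _ (by rw [pvOuter]; rw [pvInner_len c _ st, hL])]
    show pvNeg (pvOuter graph c st u).1 + (pvOuter graph c st u).2.length = _
    rw [pvOuter]
    exact pvInner_neg c _ st (hg u) hL hc

theorem pvLevel_mem {L : Nat} (graph : List (List Int)) (c : Int) (q : List Int)
    (st : List Int × List Int)
    (hg : ∀ u, ∀ v ∈ PySem.List.pyGetD graph u [], pvInR L v)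
    (hL : st.1.length = L) (hc : c ≠ -1)
    (hst : ∀ u ∈ st.2, pvInR L u ∧ PySem.List.pyGetD st.1 u 0 = c) :
    ∀ u ∈ (q.foldl (pvOuter graph c) st).2,
      pvInR L u ∧ PySem.List.pyGetD (q.foldl (pvOuter graph c) st).1 u 0 = c := by
  induction q generalizing st with
  | nil => exact hst
  | cons u q ih =>
    rw [List.foldl_cons]
    exact ih _ (by rw [pvOuter]; rw [pvInner_len c _ st, hL])
      (by rw [pvOuter]; exact pvInner_mem c _ st (hg u) hL hc hst)

theorem pvLoopA_nil (graph : List (List Int)) (fuel : Nat) (dist : List Int) :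
    pvLoopA graph fuel dist [] = dist := by
  cases fuel <;> rfl

theorem pvLoopB_nil (graph : List (List Int)) (fuel : Nat) (dist : List Int) (d : Int) :
    pvLoopB graph fuel dist [] d = dist := by
  cases fuel <;> rfl

theorem pvLevelStep {L : Nat} (graph : List (List Int)) (d : Int) (q : List Int) :
    ∀ (dist pending : List Int) (fuel : Nat),
    (∀ u, ∀ v ∈ PySem.List.pyGetD graph u [], pvInR L v) →
    (∀ u ∈ q, pvInR L u) → dist.length = L →
    (∀ u ∈ q, PySem.List.pyGetD dist u 0 = d) → 0 ≤ d →
    pvLoopA graph (q.length + fuel) dist (q ++ pending)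
      = pvLoopA graph fuel (q.foldl (pvOuter graph (d + 1)) (dist, [])).1
          (pending ++ (q.foldl (pvOuter graph (d + 1)) (dist, [])).2) := by
  induction q with
  | nil => intro dist pending fuel _ _ _ _ _; simp
  | cons now q ih =>
    intro dist pending fuel hg hq hL hvals hd
    have hlen : (now :: q).length + fuel = (q.length + fuel) + 1 := by simp; omega
    rw [hlen]
    show pvLoopA graph ((q.length + fuel) + 1) dist (now :: (q ++ pending)) = _
    rw [pvLoopA]
    have hinner := pvInner_A_eq_B (L := L) (PySem.List.pyGetD graph now []) (dist, q ++ pending) now d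
      (hg now) hL (hq now List.mem_cons_self) (hvals now List.mem_cons_self) hd
    simp only [hinner]
    rw [pvAppender_foldl (pvAppender_step (d + 1)) _ dist (q ++ pending)]
    set N1 := ((PySem.List.pyGetD graph now []).foldl (pvStep (d + 1)) (dist, [])) with hN1
    simp only []
    rw [List.append_assoc]
    have hLN : N1.1.length = L := by rw [hN1, pvInner_len]; exact hL
    have hvals' : ∀ u ∈ q, PySem.List.pyGetD N1.1 u 0 = d := by
      intro u hu
      exact pvInner_preserve (d + 1) _ (dist, []) u d (hg now) hL (hq u (List.mem_cons_of_mem _ hu))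
        (hvals u (List.mem_cons_of_mem _ hu)) (by omega)
    have := ih N1.1 (pending ++ N1.2) fuel hg (fun u hu => hq u (List.mem_cons_of_mem _ hu)) hLN hvals' hd
    rw [this]
    rw [List.foldl_cons]
    have : pvOuter graph (d + 1) (dist, []) now = N1 := by rw [hN1]; rfl
    rw [this]
    have hsplit := pvAppender_foldl (pvAppender_outer graph (d + 1)) q N1.1 N1.2
    have hN1e : (N1.1, N1.2) = N1 := rfl
    rw [hN1e] at hsplit
    rw [hsplit]
    simp

theorem pvMain {L : Nat} (graph : List (List Int))
    (hg : ∀ u, ∀ v ∈ PySem.List.pyGetD graph u [], pvInR L v) :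
    ∀ (k : Nat) (dist frontier : List Int) (d : Int) (fa fb : Nat),
    pvNeg dist ≤ k → dist.length = L →
    (∀ u ∈ frontier, pvInR L u) →
    (∀ u ∈ frontier, PySem.List.pyGetD dist u 0 = d) → 0 ≤ d →
    frontier.length + pvNeg dist ≤ fa → pvNeg dist + 1 ≤ fb →
    pvLoopA graph fa dist frontier = pvLoopB graph fb dist frontier d := by
  intro k
  induction k with
  | zero =>
    intro dist frontier d fa fb hk hL hq hvals hd hfa hfb
    cases frontier with
    | nil => rw [pvLoopA_nil, pvLoopB_nil]
    | cons u q =>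
      obtain ⟨fb', rfl⟩ : ∃ fb', fb = fb' + 1 := ⟨fb - 1, by omega⟩
      obtain ⟨fa'', hfa1, hfa2⟩ : ∃ fa'', fa = (u :: q).length + fa'' ∧ pvNeg dist ≤ fa'' := by
        have hflen : (u :: q).length = q.length + 1 := rfl
        exact ⟨fa - (u :: q).length, by omega, by omega⟩
      subst hfa1
      simp only [pvLoopB]
      have hLS := pvLevelStep (L := L) graph d (u :: q) dist [] fa'' hg hq hL hvals hd
      simp only [List.append_nil, List.nil_append] at hLS
      rw [hLS]
      have hneg := pvLevel_neg (L := L) graph (d + 1) (u :: q) (dist, []) hg hL (by omega)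
      simp only [List.length_nil, Nat.add_zero] at hneg
      have hST2 : ((u :: q).foldl (pvOuter graph (d + 1)) (dist, [])).2 = [] := by
        have := List.length_eq_zero_iff.mp (by omega : ((u :: q).foldl (pvOuter graph (d + 1)) (dist, [])).2.length = 0)
        exact this
      rw [hST2, pvLoopA_nil, pvLoopB_nil]
  | succ k ih =>
    intro dist frontier d fa fb hk hL hq hvals hd hfa hfb
    cases frontier with
    | nil => rw [pvLoopA_nil, pvLoopB_nil]
    | cons u q =>
      obtain ⟨fb', rfl⟩ : ∃ fb', fb = fb' + 1 := ⟨fb - 1, by omega⟩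
      obtain ⟨fa'', hfa1, hfa2⟩ : ∃ fa'', fa = (u :: q).length + fa'' ∧ pvNeg dist ≤ fa'' := by
        have hflen : (u :: q).length = q.length + 1 := rfl
        exact ⟨fa - (u :: q).length, by omega, by omega⟩
      subst hfa1
      simp only [pvLoopB]
      have hLS := pvLevelStep (L := L) graph d (u :: q) dist [] fa'' hg hq hL hvals hd
      simp only [List.append_nil, List.nil_append] at hLS
      rw [hLS]
      set ST := (u :: q).foldl (pvOuter graph (d + 1)) (dist, []) with hST
      have hneg := pvLevel_neg (L := L) graph (d + 1) (u :: q) (dist, []) hg hL (by omega)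
      simp only [← hST, List.length_nil, Nat.add_zero] at hneg
      by_cases hST2 : ST.2 = []
      · rw [hST2, pvLoopA_nil, pvLoopB_nil]
      · have hlen2 : 1 ≤ ST.2.length := List.length_pos_iff.mpr hST2
        have hLst : ST.1.length = L := by rw [hST]; rw [pvLevel_len]; exact hL
        have hmem := pvLevel_mem (L := L) graph (d + 1) (u :: q) (dist, []) hg hL (by omega)
          (by intro x hx; simp at hx)
        rw [← hST] at hmem
        exact ih ST.1 ST.2 (d + 1) fa'' fb'
          (by omega) hLst (fun x hx => (hmem x hx).1) (fun x hx => (hmem x hx).2) (by omega)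
          (by omega) (by omega)

theorem pvCellsOk {L : Nat} (g : List (List Int)) (u : Int)
    (hcells : ∀ l ∈ g, ∀ v ∈ l, pvInR L v) :
    ∀ v ∈ PySem.List.pyGetD g u [], pvInR L v := by
  by_cases h : PySem.Raise.InRange g.length u
  · exact hcells _ (PySem.List.pyGetD_mem g [] h)
  · rw [PySem.List.pyGetD_of_none g u [] ((PySem.List.pyGet?_eq_none_iff g u).mpr h)]
    intro v hv; cases hv

theorem pvAppendCell_ok {L : Nat} (g : List (List Int)) (a b : Int)
    (hg : g.length = L)
    (hcells : ∀ l ∈ g, ∀ v ∈ l, pvInR L v) (hb : pvInR L b) (ha : pvInR L a) :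
    ∀ l ∈ PySem.List.pySetD g a (PySem.List.pyGetD g a [] ++ [b]), ∀ v ∈ l, pvInR L v := by
  intro l hl v hv
  rw [pvSetBridge g _ hg ha] at hl
  rcases List.mem_or_eq_of_mem_set hl with h | rfl
  · exact hcells l h v hv
  · rcases List.mem_append.mp hv with h | h
    · exact pvCellsOk g a hcells v h
    · simp at h; rw [h]; exact hb

theorem pvBuildGraph_inR (n : Int) (roads : List (Int × Int)) (hn : 0 ≤ n)
    (hr : ∀ r ∈ roads, -(n + 1) ≤ r.1 ∧ r.1 ≤ n ∧ -(n + 1) ≤ r.2 ∧ r.2 ≤ n) :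
    ∀ u, ∀ v ∈ PySem.List.pyGetD (pvBuildGraph n roads) u [], pvInR (n + 1).toNat v := by
  suffices h : ∀ l ∈ pvBuildGraph n roads, ∀ v ∈ l, pvInR (n + 1).toNat v by
    intro u; exact pvCellsOk _ u h
  have hcast : (((n + 1).toNat : Nat) : Int) = n + 1 := by omega
  unfold pvBuildGraph
  generalize hinit : List.replicate (n + 1).toNat ([] : List Int) = g0
  have h0 : ∀ l ∈ g0, ∀ v ∈ l, pvInR (n + 1).toNat v := by
    intro l hl; rw [← hinit] at hl
    rw [List.eq_of_mem_replicate hl]; intro v hv; cases hv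
  have hlen0 : g0.length = (n + 1).toNat := by rw [← hinit]; exact List.length_replicate
  clear hinit
  induction roads generalizing g0 with
  | nil => exact h0
  | cons r roads ih =>
    rw [List.foldl_cons]
    have h1 := hr r List.mem_cons_self
    have ha : pvInR (n + 1).toNat r.1 := ⟨by omega, by omega⟩
    have hb : pvInR (n + 1).toNat r.2 := ⟨by omega, by omega⟩
    have hg1len : (PySem.List.pySetD g0 r.1 (PySem.List.pyGetD g0 r.1 [] ++ [r.2])).length
        = (n + 1).toNat := by rw [PySem.List.length_pySetD]; exact hlen0
    refine ih (fun r' hr' => hr r' (List.mem_cons_of_mem _ hr')) _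
      (pvAppendCell_ok _ _ _ hg1len (pvAppendCell_ok g0 r.1 r.2 hlen0 h0 hb ha) ha hb)
      (by rw [PySem.List.length_pySetD]; exact hg1len)

-- ===== stage 2: the level BFS equals the edge-relaxation loop =====

-- characterization of a distance array mid-round: cells satisfying T (and unreached at round
-- start, array D0) hold c; every other cell still holds its round-start value
def pvChar (L : Nat) (c : Int) (D0 D : List Int) (T : Nat → Prop) : Prop :=
  ∀ j, j < L → (D0.getD j 0 = -1 ∧ T j → D.getD j 0 = c) ∧
    (¬(D0.getD j 0 = -1 ∧ T j) → D.getD j 0 = D0.getD j 0)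

theorem pvChar_iff {L : Nat} {c : Int} {D0 D : List Int} {T T' : Nat → Prop}
    (h : ∀ j, j < L → (T j ↔ T' j)) (hch : pvChar L c D0 D T) : pvChar L c D0 D T' := by
  intro j hj
  obtain ⟨h1, h2⟩ := hch j hj
  exact ⟨fun hx => h1 ⟨hx.1, (h j hj).mpr hx.2⟩,
         fun hx => h2 (fun hy => hx ⟨hy.1, (h j hj).mp hy.2⟩)⟩

theorem pvChar_refl (L : Nat) (c : Int) (D0 : List Int) :
    pvChar L c D0 D0 (fun _ => False) := by
  intro j hj; exact ⟨fun hx => absurd hx.2 (fun h => h), fun _ => rfl⟩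

theorem pvChar_read {L : Nat} {c : Int} {D0 D : List Int} {T : Nat → Prop} (hc : 1 ≤ c)
    (hch : pvChar L c D0 D T) (j : Nat) (hj : j < L) :
    (D.getD j 0 = c - 1 ↔ D0.getD j 0 = c - 1) ∧
    (D.getD j 0 = -1 ↔ (D0.getD j 0 = -1 ∧ ¬ T j)) := by
  obtain ⟨h1, h2⟩ := hch j hj
  by_cases hT : D0.getD j 0 = -1 ∧ T j
  · have hv := h1 hT
    have hv0 := hT.1
    constructor
    · constructor <;> intro h <;> omega
    · constructor
      · intro h; omega
      · intro h; exact absurd hT.2 h.2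
  · have hv := h2 hT
    rw [hv]
    constructor
    · exact Iff.rfl
    · constructor
      · intro h; exact ⟨h, fun ht => hT ⟨h, ht⟩⟩
      · intro h; exact h.1

-- assigning c into an unreached cell cb extends the characterization by (Q ∧ cb = j)
theorem pvAssignChar {L : Nat} (c : Int) (hc : 1 ≤ c) (D0 D : List Int) (T : Nat → Prop)
    (b : Int) (hb : pvInR L b) (hD : D.length = L)
    (hch : pvChar L c D0 D T) (hcur : D.getD (pvIdx L b) 0 = -1) (Q : Prop) (hQ : Q) :
    pvChar L c D0 (PySem.List.pySetD D b c) (fun j => T j ∨ (Q ∧ pvIdx L b = j)) := by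
  have hset : PySem.List.pySetD D b c = D.set (pvIdx L b) c := pvSetBridge D c hD hb
  have hD0b : D0.getD (pvIdx L b) 0 = -1 ∧ ¬ T (pvIdx L b) :=
    ((pvChar_read hc hch (pvIdx L b) (pvIdx_lt hb)).2).mp hcur
  intro j hj
  rw [hset, pvGetDSet D (pvIdx L b) j c 0 (by rw [hD]; exact hj)]
  by_cases hbj : pvIdx L b = j
  · subst hbj
    rw [if_pos rfl]
    exact ⟨fun _ => rfl, fun hx => absurd ⟨hD0b.1, Or.inr ⟨hQ, rfl⟩⟩ hx⟩
  · rw [if_neg hbj]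
    obtain ⟨h1, h2⟩ := hch j hj
    constructor
    · rintro ⟨hneg, hT | ⟨_, hcb⟩⟩
      · exact h1 ⟨hneg, hT⟩
      · exact absurd hcb hbj
    · intro hx
      exact h2 (fun hy => hx ⟨hy.1, Or.inl hy.2⟩)

-- skipping the assignment still extends the characterization when the guard is false
theorem pvSkipChar {L : Nat} {c : Int} {D0 D : List Int} {T : Nat → Prop}
    (b : Int) (Q : Prop)
    (hch : pvChar L c D0 D T)
    (hno : ¬ (Q ∧ D.getD (pvIdx L b) 0 = -1)) :
    pvChar L c D0 D (fun j => T j ∨ (Q ∧ pvIdx L b = j)) := by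
  intro j hj
  obtain ⟨h1, h2⟩ := hch j hj
  constructor
  · rintro ⟨hneg, hT | ⟨hQ, hcb⟩⟩
    · exact h1 ⟨hneg, hT⟩
    · by_cases hT2 : T j
      · exact h1 ⟨hneg, hT2⟩
      · have hDj := h2 (fun hy => hT2 hy.2)
        rw [hneg] at hDj
        rw [hcb] at hno
        exact absurd ⟨hQ, hDj⟩ hno
  · intro hx
    exact h2 (fun hy => hx ⟨hy.1, Or.inl hy.2⟩)

-- the contribution of one road to the reachable-in-this-round cells, read off the round-start array
def pvTB (L : Nat) (d : Int) (D0 : List Int) (r : Int × Int) (j : Nat) : Prop :=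
  (D0.getD (pvIdx L r.1) 0 = d ∧ pvIdx L r.2 = j) ∨ (D0.getD (pvIdx L r.2) 0 = d ∧ pvIdx L r.1 = j)

set_option maxHeartbeats 1600000 in
theorem pvEdgeStep_facts {L : Nat} (d : Int) (hd : 0 ≤ d) (D0 : List Int) (_hD0 : D0.length = L)
    (r : Int × Int) (ha : pvInR L r.1) (hb : pvInR L r.2)
    (D : List Int) (flag : Bool) (T : Nat → Prop) (hD : D.length = L)
    (hch : pvChar L (d + 1) D0 D T)
    (hfl : flag = true → ∃ j, j < L ∧ D0.getD j 0 = -1 ∧ T j) :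
    (pvEdgeStep (d + 1) (D, flag) r).1.length = L
    ∧ pvChar L (d + 1) D0 (pvEdgeStep (d + 1) (D, flag) r).1 (fun j => T j ∨ pvTB L d D0 r j)
    ∧ ((pvEdgeStep (d + 1) (D, flag) r).2 = true →
        ∃ j, j < L ∧ D0.getD j 0 = -1 ∧ (T j ∨ pvTB L d D0 r j))
    ∧ ((pvEdgeStep (d + 1) (D, flag) r).2 = false → (pvEdgeStep (d + 1) (D, flag) r).1 = D ∧ flag = false) := by
  have hc1 : (1 : Int) ≤ d + 1 := by omega
  have hdd : d + 1 - 1 = d := by omega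
  have hga := pvGetDBridge D (0 : Int) hD ha
  have hgb := pvGetDBridge D (0 : Int) hD hb
  unfold pvEdgeStep
  simp only [hdd]
  by_cases h1 : PySem.List.pyGetD D r.1 0 = d ∧ PySem.List.pyGetD D r.2 0 = -1
  · -- first guard fires: assign cell of r.2
    rw [if_pos h1]
    have hcura : D.getD (pvIdx L r.1) 0 = d := by rw [← hga]; exact h1.1
    have hcurb : D.getD (pvIdx L r.2) 0 = -1 := by rw [← hgb]; exact h1.2
    have hQ1 : D0.getD (pvIdx L r.1) 0 = d := by
      have := (pvChar_read hc1 hch (pvIdx L r.1) (pvIdx_lt ha)).1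
      simp only [show d + 1 - 1 = d from by omega] at this
      exact this.mp hcura
    have hch1 := pvAssignChar (d + 1) hc1 D0 D T r.2 hb hD hch hcurb
      (D0.getD (pvIdx L r.1) 0 = d) hQ1
    have hD0b : D0.getD (pvIdx L r.2) 0 = -1 ∧ ¬ T (pvIdx L r.2) :=
      ((pvChar_read hc1 hch (pvIdx L r.2) (pvIdx_lt hb)).2).mp hcurb
    set E1 := PySem.List.pySetD D r.2 (d + 1) with hE1
    have hE1len : E1.length = L := by rw [hE1, PySem.List.length_pySetD]; exact hD
    -- second guard cannot fire: E1's cell of r.2 now holds d+1 ≠ d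
    have hreadb : PySem.List.pyGetD E1 r.2 0 = d + 1 := by
      rw [pvGetDBridge E1 (0 : Int) hE1len hb, hE1, pvSetBridge D (d + 1) hD hb,
        pvGetDSet D (pvIdx L r.2) (pvIdx L r.2) (d + 1) 0 (by rw [hD]; exact pvIdx_lt hb), if_pos rfl]
    have h2 : ¬ (PySem.List.pyGetD E1 r.2 0 = d ∧ PySem.List.pyGetD E1 r.1 0 = -1) := by
      rintro ⟨hx, -⟩; rw [hreadb] at hx; omega
    rw [if_neg h2]
    refine ⟨hE1len, ?_, ?_, ?_⟩
    · -- extend char by the second (dead) contribution via pvSkipChar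
      have hch2 := pvSkipChar (c := d + 1) (D0 := D0) r.1
        (D0.getD (pvIdx L r.2) 0 = d) hch1 (by rintro ⟨hx, -⟩; rw [hD0b.1] at hx; omega)
      refine pvChar_iff (fun j hj => ?_) hch2
      unfold pvTB; tauto
    · intro _
      exact ⟨pvIdx L r.2, pvIdx_lt hb, hD0b.1, Or.inr (Or.inl ⟨hQ1, rfl⟩)⟩
    · intro h; cases h
  · rw [if_neg h1]
    have hcond1 : ¬ (D0.getD (pvIdx L r.1) 0 = d ∧ D.getD (pvIdx L r.2) 0 = -1) := by
      rintro ⟨hx, hy⟩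
      apply h1
      constructor
      · rw [hga]
        have := (pvChar_read hc1 hch (pvIdx L r.1) (pvIdx_lt ha)).1
        simp only [show d + 1 - 1 = d from by omega] at this
        exact this.mpr hx
      · rw [hgb]; exact hy
    have hch1 := pvSkipChar (c := d + 1) (D0 := D0) r.2 (D0.getD (pvIdx L r.1) 0 = d) hch hcond1
    by_cases h2 : PySem.List.pyGetD D r.2 0 = d ∧ PySem.List.pyGetD D r.1 0 = -1
    · rw [if_pos h2]
      have hcurb : D.getD (pvIdx L r.2) 0 = d := by rw [← hgb]; exact h2.1
      have hcura : D.getD (pvIdx L r.1) 0 = -1 := by rw [← hga]; exact h2.2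
      have hQ2 : D0.getD (pvIdx L r.2) 0 = d := by
        have := (pvChar_read hc1 hch (pvIdx L r.2) (pvIdx_lt hb)).1
        simp only [show d + 1 - 1 = d from by omega] at this
        exact this.mp hcurb
      have hD0a : D0.getD (pvIdx L r.1) 0 = -1 ∧ ¬ T (pvIdx L r.1) :=
        ((pvChar_read hc1 hch (pvIdx L r.1) (pvIdx_lt ha)).2).mp hcura
      have hch2 := pvAssignChar (d + 1) hc1 D0 D
        (fun j => T j ∨ (D0.getD (pvIdx L r.1) 0 = d ∧ pvIdx L r.2 = j)) r.1 ha hD hch1 hcura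
        (D0.getD (pvIdx L r.2) 0 = d) hQ2
      refine ⟨by rw [PySem.List.length_pySetD]; exact hD, ?_, ?_, ?_⟩
      · refine pvChar_iff (fun j hj => ?_) hch2
        unfold pvTB; tauto
      · intro _
        exact ⟨pvIdx L r.1, pvIdx_lt ha, hD0a.1, Or.inr (Or.inr ⟨hQ2, rfl⟩)⟩
      · intro h; cases h
    · rw [if_neg h2]
      have hcond2 : ¬ (D0.getD (pvIdx L r.2) 0 = d ∧ D.getD (pvIdx L r.1) 0 = -1) := by
        rintro ⟨hx, hy⟩
        apply h2
        constructor
        · rw [hgb]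
          have := (pvChar_read hc1 hch (pvIdx L r.2) (pvIdx_lt hb)).1
          simp only [show d + 1 - 1 = d from by omega] at this
          exact this.mpr hx
        · rw [hga]; exact hy
      have hch2 := pvSkipChar (c := d + 1) (D0 := D0) r.1
        (D0.getD (pvIdx L r.2) 0 = d) hch1 hcond2
      refine ⟨hD, ?_, ?_, fun hx => ⟨rfl, hx⟩⟩
      · refine pvChar_iff (fun j hj => ?_) hch2
        unfold pvTB; tauto
      · intro hf
        obtain ⟨j, hj, hneg, hT⟩ := hfl hf
        exact ⟨j, hj, hneg, Or.inl hT⟩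

theorem pvEdgeFold {L : Nat} (d : Int) (hd : 0 ≤ d) (roads : List (Int × Int))
    (hrr : ∀ r ∈ roads, pvInR L r.1 ∧ pvInR L r.2)
    (D0 : List Int) (hD0 : D0.length = L) :
    ∀ (D : List Int) (flag : Bool) (T : Nat → Prop), D.length = L → pvChar L (d + 1) D0 D T →
    (flag = true → ∃ j, j < L ∧ D0.getD j 0 = -1 ∧ T j) →
    (roads.foldl (pvEdgeStep (d + 1)) (D, flag)).1.length = L
    ∧ pvChar L (d + 1) D0 (roads.foldl (pvEdgeStep (d + 1)) (D, flag)).1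
        (fun j => T j ∨ ∃ r ∈ roads, pvTB L d D0 r j)
    ∧ ((roads.foldl (pvEdgeStep (d + 1)) (D, flag)).2 = true →
        ∃ j, j < L ∧ D0.getD j 0 = -1 ∧ (T j ∨ ∃ r ∈ roads, pvTB L d D0 r j))
    ∧ ((roads.foldl (pvEdgeStep (d + 1)) (D, flag)).2 = false →
        (roads.foldl (pvEdgeStep (d + 1)) (D, flag)).1 = D ∧ flag = false) := by
  induction roads with
  | nil =>
    intro D flag T hD hch hfl
    refine ⟨hD, pvChar_iff (fun j hj => by simp) hch, ?_, fun _ => ⟨rfl, ?_⟩⟩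
    · intro hf
      obtain ⟨j, hj, hneg, hT⟩ := hfl hf
      exact ⟨j, hj, hneg, Or.inl hT⟩
    · cases flag
      · rfl
      · rename_i hf; exact hf
  | cons r roads ih =>
    intro D flag T hD hch hfl
    have hra := hrr r List.mem_cons_self
    obtain ⟨hlen1, hch1, hfl1, hid1⟩ :=
      pvEdgeStep_facts d hd D0 hD0 r hra.1 hra.2 D flag T hD hch hfl
    rw [List.foldl_cons]
    have hpair : pvEdgeStep (d + 1) (D, flag) r
        = ((pvEdgeStep (d + 1) (D, flag) r).1, (pvEdgeStep (d + 1) (D, flag) r).2) := rfl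
    rw [hpair]
    obtain ⟨hlen2, hch2, hfl2, hid2⟩ := ih (fun r' hr' => hrr r' (List.mem_cons_of_mem _ hr'))
      (pvEdgeStep (d + 1) (D, flag) r).1 (pvEdgeStep (d + 1) (D, flag) r).2
      (fun j => T j ∨ pvTB L d D0 r j) hlen1 hch1 hfl1
    refine ⟨hlen2, ?_, ?_, ?_⟩
    · refine pvChar_iff (fun j hj => ?_) hch2
      simp only [List.mem_cons]
      constructor
      · rintro ((hT | hr0) | ⟨r', hr', ht⟩)
        · exact Or.inl hT
        · exact Or.inr ⟨r, Or.inl rfl, hr0⟩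
        · exact Or.inr ⟨r', Or.inr hr', ht⟩
      · rintro (hT | ⟨r', (rfl | hr'), ht⟩)
        · exact Or.inl (Or.inl hT)
        · exact Or.inl (Or.inr ht)
        · exact Or.inr ⟨r', hr', ht⟩
    · intro hf
      obtain ⟨j, hj, hneg, hT⟩ := hfl2 hf
      refine ⟨j, hj, hneg, ?_⟩
      simp only [List.mem_cons]
      rcases hT with (hT | hr0) | ⟨r', hr', ht⟩
      · exact Or.inl hT
      · exact Or.inr ⟨r, Or.inl rfl, hr0⟩
      · exact Or.inr ⟨r', Or.inr hr', ht⟩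
    · intro hf
      obtain ⟨he, hf1⟩ := hid2 hf
      obtain ⟨he1, hf0⟩ := hid1 hf1
      exact ⟨by rw [he, he1], hf0⟩

-- A's level fold, distance component, as a flat fold over the concatenated neighbour lists
def pvF (c : Int) (D : List Int) (v : Int) : List Int :=
  if PySem.List.pyGetD D v 0 = -1 then PySem.List.pySetD D v c else D

theorem pvFold_fst (c : Int) (l : List Int) :
    ∀ (D acc : List Int), (l.foldl (pvStep c) (D, acc)).1 = l.foldl (pvF c) D := by
  induction l with
  | nil => intro D acc; rfl
  | cons v l ih =>
    intro D acc
    rw [List.foldl_cons, List.foldl_cons]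
    have : pvStep c (D, acc) v = (pvF c D v, (pvStep c (D, acc) v).2) := by
      unfold pvStep pvF; dsimp only; split <;> rfl
    rw [this, ih]

theorem pvOuterFold_fst (graph : List (List Int)) (c : Int) (F : List Int) :
    ∀ (D acc : List Int), (F.foldl (pvOuter graph c) (D, acc)).1
      = (F.flatMap (fun u => PySem.List.pyGetD graph u [])).foldl (pvF c) D := by
  induction F with
  | nil => intro D acc; rfl
  | cons u F ih =>
    intro D acc
    rw [List.foldl_cons, List.flatMap_cons, List.foldl_append]
    have : pvOuter graph c (D, acc) u
        = ((PySem.List.pyGetD graph u []).foldl (pvF c) D, (pvOuter graph c (D, acc) u).2) := by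
      unfold pvOuter
      rw [← pvFold_fst c _ D acc]
    rw [this, ih]

theorem pvF_char {L : Nat} (c : Int) (hc : 1 ≤ c) (l : List Int) (hl : ∀ v ∈ l, pvInR L v)
    (D0 : List Int) :
    ∀ (D : List Int) (T : Nat → Prop), D.length = L → pvChar L c D0 D T →
    (l.foldl (pvF c) D).length = L ∧
    pvChar L c D0 (l.foldl (pvF c) D) (fun j => T j ∨ ∃ v ∈ l, pvIdx L v = j) := by
  induction l with
  | nil =>
    intro D T hD hch
    exact ⟨hD, pvChar_iff (fun j hj => by simp) hch⟩
  | cons v l ih =>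
    intro D T hD hch
    have hv := hl v List.mem_cons_self
    have hstep : (pvF c D v).length = L ∧
        pvChar L c D0 (pvF c D v) (fun j => T j ∨ pvIdx L v = j) := by
      unfold pvF
      by_cases hcond : PySem.List.pyGetD D v 0 = -1
      · rw [if_pos hcond]
        have hcur : D.getD (pvIdx L v) 0 = -1 := by
          rw [← pvGetDBridge D (0 : Int) hD hv]; exact hcond
        refine ⟨by rw [PySem.List.length_pySetD]; exact hD, ?_⟩
        have := pvAssignChar c hc D0 D T v hv hD hch hcur True trivial
        exact pvChar_iff (fun j hj => by tauto) this
      · rw [if_neg hcond]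
        have hcur : ¬ (True ∧ D.getD (pvIdx L v) 0 = -1) := by
          rintro ⟨-, hx⟩
          rw [← pvGetDBridge D (0 : Int) hD hv] at hx
          exact hcond hx
        have := pvSkipChar (c := c) (D0 := D0) v True hch hcur
        exact ⟨hD, pvChar_iff (fun j hj => by tauto) this⟩
    obtain ⟨hlen1, hch1⟩ := hstep
    rw [List.foldl_cons]
    obtain ⟨hlen2, hch2⟩ := ih (fun v' hv' => hl v' (List.mem_cons_of_mem _ hv')) (pvF c D v)
      (fun j => T j ∨ pvIdx L v = j) hlen1 hch1
    refine ⟨hlen2, pvChar_iff (fun j hj => ?_) hch2⟩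
    simp only [List.mem_cons]
    constructor
    · rintro ((hT | hvj) | ⟨v', hv', hj'⟩)
      · exact Or.inl hT
      · exact Or.inr ⟨v, Or.inl rfl, hvj⟩
      · exact Or.inr ⟨v', Or.inr hv', hj'⟩
    · rintro (hT | ⟨v', (rfl | hv'), hj'⟩)
      · exact Or.inl (Or.inl hT)
      · exact Or.inl (Or.inr hj')
      · exact Or.inr ⟨v', hv', hj'⟩

-- two arrays with the same characterization are equal
theorem pvChar_unique {L : Nat} {c : Int} {D0 DA DB : List Int} {TA TB : Nat → Prop}
    (hA : pvChar L c D0 DA TA) (hB : pvChar L c D0 DB TB)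
    (hiff : ∀ j, j < L → (TA j ↔ TB j))
    (hDA : DA.length = L) (hDB : DB.length = L) : DA = DB := by
  apply List.ext_getElem (by rw [hDA, hDB])
  intro j hjA hjB
  have hjL : j < L := by rw [← hDA]; exact hjA
  obtain ⟨hA1, hA2⟩ := hA j hjL
  obtain ⟨hB1, hB2⟩ := hB j hjL
  have hga : DA.getD j 0 = DA[j] := List.getD_eq_getElem DA 0 hjA
  have hgb : DB.getD j 0 = DB[j] := List.getD_eq_getElem DB 0 hjB
  by_cases hcond : D0.getD j 0 = -1 ∧ TA j
  · rw [← hga, ← hgb, hA1 hcond, hB1 ⟨hcond.1, (hiff j hjL).mp hcond.2⟩]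
  · rw [← hga, ← hgb, hA2 hcond, hB2 (fun hy => hcond ⟨hy.1, (hiff j hjL).mpr hy.2⟩)]

-- completeness of the collected next frontier: every cell that holds c has a representative
theorem pvStepFold_complete {L : Nat} (c : Int) (l : List Int) (hl : ∀ v ∈ l, pvInR L v) :
    ∀ (st : List Int × List Int), st.1.length = L →
    (∀ j, j < L → st.1.getD j 0 = c → ∃ u ∈ st.2, pvIdx L u = j) →
    (∀ j, j < L → (l.foldl (pvStep c) st).1.getD j 0 = c →
      ∃ u ∈ (l.foldl (pvStep c) st).2, pvIdx L u = j) := by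
  induction l with
  | nil => intro st hL hinv; exact hinv
  | cons v l ih =>
    intro st hL hinv
    have hv := hl v List.mem_cons_self
    rw [List.foldl_cons]
    refine ih (fun v' hv' => hl v' (List.mem_cons_of_mem _ hv')) (pvStep c st v)
      (by rw [pvStep_len]; exact hL) ?_
    intro j hj hval
    unfold pvStep at hval ⊢
    split at hval <;> rename_i hcond
    · rw [pvSetBridge st.1 c hL hv,
        pvGetDSet st.1 (pvIdx L v) j c 0 (by rw [hL]; exact hj)] at hval
      split at hval
      · rename_i hvj
        exact ⟨v, by simp [hcond], hvj⟩
      · obtain ⟨u, hu, hj'⟩ := hinv j hj hval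
        exact ⟨u, by simp [hcond]; exact Or.inl hu, hj'⟩
    · simp only [hcond, ite_false]
      exact hinv j hj hval

theorem pvLevel_complete {L : Nat} (graph : List (List Int)) (c : Int) (F : List Int)
    (hg : ∀ u, ∀ v ∈ PySem.List.pyGetD graph u [], pvInR L v) :
    ∀ (st : List Int × List Int), st.1.length = L →
    (∀ j, j < L → st.1.getD j 0 = c → ∃ u ∈ st.2, pvIdx L u = j) →
    (∀ j, j < L → (F.foldl (pvOuter graph c) st).1.getD j 0 = c →
      ∃ u ∈ (F.foldl (pvOuter graph c) st).2, pvIdx L u = j) := by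
  induction F with
  | nil => intro st hL hinv; exact hinv
  | cons u F ih =>
    intro st hL hinv
    rw [List.foldl_cons]
    exact ih (pvOuter graph c st u) (by rw [pvOuter, pvInner_len]; exact hL)
      (by rw [pvOuter]; exact pvStepFold_complete c _ (hg u) st hL hinv)

-- one round: the edge scan computes exactly the level fold's array, and its changed flag
-- is false exactly when the collected next frontier is empty
theorem pvRound {L : Nat} (graph : List (List Int)) (roads : List (Int × Int))
    (hg : ∀ u, ∀ v ∈ PySem.List.pyGetD graph u [], pvInR L v)
    (hrr : ∀ r ∈ roads, pvInR L r.1 ∧ pvInR L r.2)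
    (HG : ∀ u v, pvInR L u → (v ∈ PySem.List.pyGetD graph u [] ↔
      ∃ r ∈ roads, (pvIdx L r.1 = pvIdx L u ∧ v = r.2) ∨ (pvIdx L r.2 = pvIdx L u ∧ v = r.1)))
    (dist F : List Int) (d : Int) (hd : 0 ≤ d) (hL : dist.length = L)
    (hFs : ∀ u ∈ F, pvInR L u ∧ PySem.List.pyGetD dist u 0 = d)
    (hFc : ∀ j, j < L → dist.getD j 0 = d → ∃ u ∈ F, pvIdx L u = j)
    (hB : ∀ j, j < L → dist.getD j 0 = -1 ∨ (0 ≤ dist.getD j 0 ∧ dist.getD j 0 ≤ d)) :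
    (roads.foldl (pvEdgeStep (d + 1)) (dist, false)).1
      = (F.foldl (pvOuter graph (d + 1)) (dist, [])).1
    ∧ ((roads.foldl (pvEdgeStep (d + 1)) (dist, false)).2 = false ↔
        (F.foldl (pvOuter graph (d + 1)) (dist, [])).2 = [])
    ∧ (∀ j, j < L → (F.foldl (pvOuter graph (d + 1)) (dist, [])).1.getD j 0 = -1
        ∨ (0 ≤ (F.foldl (pvOuter graph (d + 1)) (dist, [])).1.getD j 0
           ∧ (F.foldl (pvOuter graph (d + 1)) (dist, [])).1.getD j 0 ≤ d + 1)) := by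
  set LA := F.flatMap (fun u => PySem.List.pyGetD graph u []) with hLA
  have hLAr : ∀ v ∈ LA, pvInR L v := by
    intro v hv
    rw [hLA, List.mem_flatMap] at hv
    obtain ⟨u, hu, hv⟩ := hv
    exact hg u v hv
  have hchar0 := pvChar_refl L (d + 1) dist
  obtain ⟨hlenA, hchA⟩ := pvF_char (d + 1) (by omega) LA hLAr dist dist (fun _ => False) hL hchar0
  obtain ⟨hlenB, hchB, hflT, hflF⟩ := pvEdgeFold d hd roads hrr dist hL dist false (fun _ => False)
    hL hchar0 (by intro h; cases h)
  have hfstA : (F.foldl (pvOuter graph (d + 1)) (dist, [])).1 = LA.foldl (pvF (d + 1)) dist :=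
    pvOuterFold_fst graph (d + 1) F dist []
  -- the two touched-cell predicates agree
  have hiff : ∀ j, j < L →
      ((False ∨ ∃ v ∈ LA, pvIdx L v = j) ↔ (False ∨ ∃ r ∈ roads, pvTB L d dist r j)) := by
    intro j hj
    simp only [false_or]
    constructor
    · rintro ⟨v, hv, rfl⟩
      rw [hLA, List.mem_flatMap] at hv
      obtain ⟨u, hu, hv⟩ := hv
      obtain ⟨hur, huv⟩ := hFs u hu
      have hucell : dist.getD (pvIdx L u) 0 = d := by
        rw [← pvGetDBridge dist (0 : Int) hL hur]; exact huv
      obtain ⟨r, hr, hcase⟩ := (HG u v hur).mp hv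
      rcases hcase with ⟨hr1, rfl⟩ | ⟨hr2, rfl⟩
      · exact ⟨r, hr, Or.inl ⟨by rw [hr1]; exact hucell, rfl⟩⟩
      · exact ⟨r, hr, Or.inr ⟨by rw [hr2]; exact hucell, rfl⟩⟩
    · rintro ⟨r, hr, hcase⟩
      have hra := hrr r hr
      rcases hcase with ⟨hval, rfl⟩ | ⟨hval, rfl⟩
      · obtain ⟨u, hu, hcu⟩ := hFc (pvIdx L r.1) (pvIdx_lt hra.1) hval
        have hur := (hFs u hu).1
        refine ⟨r.2, ?_, rfl⟩
        rw [hLA, List.mem_flatMap]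
        exact ⟨u, hu, (HG u r.2 hur).mpr ⟨r, hr, Or.inl ⟨by rw [hcu], rfl⟩⟩⟩
      · obtain ⟨u, hu, hcu⟩ := hFc (pvIdx L r.2) (pvIdx_lt hra.2) hval
        have hur := (hFs u hu).1
        refine ⟨r.1, ?_, rfl⟩
        rw [hLA, List.mem_flatMap]
        exact ⟨u, hu, (HG u r.1 hur).mpr ⟨r, hr, Or.inr ⟨by rw [hcu], rfl⟩⟩⟩
  have heq : (roads.foldl (pvEdgeStep (d + 1)) (dist, false)).1
      = (F.foldl (pvOuter graph (d + 1)) (dist, [])).1 := by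
    rw [hfstA]
    exact pvChar_unique hchB hchA (fun j hj => Iff.symm ((hiff j hj))) hlenB hlenA
  refine ⟨heq, ⟨?_, ?_⟩, ?_⟩
  · -- changed = false → next frontier empty
    intro hf
    by_contra hne
    obtain ⟨u, hu⟩ := List.exists_mem_of_ne_nil _ hne
    have hm := pvLevel_mem (L := L) graph (d + 1) F (dist, []) hg hL (by omega)
      (by intro x hx; cases hx) u hu
    have hcell : (F.foldl (pvOuter graph (d + 1)) (dist, [])).1.getD (pvIdx L u) 0 = d + 1 := by
      rw [← pvGetDBridge _ (0 : Int) (by rw [pvLevel_len]; exact hL) hm.1]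
      exact hm.2
    have hDeq := (hflF hf).1
    rw [← heq, hDeq] at hcell
    rcases hB (pvIdx L u) (pvIdx_lt hm.1) with h | h <;> omega
  · -- next frontier empty → changed = false
    intro hemp
    cases hflag : (roads.foldl (pvEdgeStep (d + 1)) (dist, false)).2
    · rfl
    · exfalso
      obtain ⟨j, hj, hneg, hT⟩ := hflT hflag
      have hTA : ∃ v ∈ LA, pvIdx L v = j := by
        rcases hT with h | h
        · cases h
        · rcases (hiff j hj).mpr (Or.inr h) with h' | h'
          · cases h'
          · exact h'
      have hval : (LA.foldl (pvF (d + 1)) dist).getD j 0 = d + 1 :=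
        (hchA j hj).1 ⟨hneg, Or.inr hTA⟩
      rw [← hfstA] at hval
      obtain ⟨u, hu, -⟩ := pvLevel_complete (L := L) graph (d + 1) F hg (dist, []) hL
        (by
          intro j' hj' hv'
          exfalso
          have hv2 : dist.getD j' 0 = d + 1 := hv'
          rcases hB j' hj' with h | h <;> omega) j hj hval
      rw [hemp] at hu
      cases hu
  · -- values after the round are -1 or in [0, d+1]
    intro j hj
    rw [hfstA]
    obtain ⟨h1, h2⟩ := hchA j hj
    by_cases hcond : dist.getD j 0 = -1 ∧ ((False : Prop) ∨ ∃ v ∈ LA, pvIdx L v = j)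
    · rw [h1 hcond]; right; omega
    · rw [h2 hcond]
      rcases hB j hj with h | h
      · left; exact h
      · right; omega

-- the level loop equals the edge-relaxation loop
theorem pvLoopC_succ (roads : List (Int × Int)) (fuel : Nat) (dist : List Int) (d : Int) :
    pvLoopC roads (fuel + 1) dist d =
      if (roads.foldl (pvEdgeStep (d + 1)) (dist, false)).2
      then pvLoopC roads fuel (roads.foldl (pvEdgeStep (d + 1)) (dist, false)).1 (d + 1)
      else (roads.foldl (pvEdgeStep (d + 1)) (dist, false)).1 := rfl

theorem pvMain2 {L : Nat} (graph : List (List Int)) (roads : List (Int × Int))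
    (hg : ∀ u, ∀ v ∈ PySem.List.pyGetD graph u [], pvInR L v)
    (hrr : ∀ r ∈ roads, pvInR L r.1 ∧ pvInR L r.2)
    (HG : ∀ u v, pvInR L u → (v ∈ PySem.List.pyGetD graph u [] ↔
      ∃ r ∈ roads, (pvIdx L r.1 = pvIdx L u ∧ v = r.2) ∨ (pvIdx L r.2 = pvIdx L u ∧ v = r.1))) :
    ∀ (k : Nat) (dist F : List Int) (d : Int) (fb fc : Nat),
    pvNeg dist ≤ k → dist.length = L →
    (∀ u ∈ F, pvInR L u ∧ PySem.List.pyGetD dist u 0 = d) →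
    (∀ j, j < L → dist.getD j 0 = d → ∃ u ∈ F, pvIdx L u = j) →
    (∀ j, j < L → dist.getD j 0 = -1 ∨ (0 ≤ dist.getD j 0 ∧ dist.getD j 0 ≤ d)) →
    0 ≤ d → pvNeg dist + 2 ≤ fb → pvNeg dist + 2 ≤ fc →
    pvLoopB graph fb dist F d = pvLoopC roads fc dist d := by
  intro k
  induction k with
  | zero =>
    intro dist F d fb fc hk hL hFs hFc hB0 hd hfb hfc
    obtain ⟨fc', rfl⟩ : ∃ fc', fc = fc' + 1 := ⟨fc - 1, by omega⟩
    obtain ⟨hR1, hR2, hR3⟩ := pvRound graph roads hg hrr HG dist F d hd hL hFs hFc hB0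
    cases F with
    | nil =>
      rw [pvLoopB_nil, pvLoopC_succ, hR2.mpr rfl, hR1]
      rfl
    | cons u q =>
      obtain ⟨fb', rfl⟩ : ∃ fb', fb = fb' + 1 := ⟨fb - 1, by omega⟩
      have hneg := pvLevel_neg (L := L) graph (d + 1) (u :: q) (dist, []) hg hL (by omega)
      simp only [List.length_nil, Nat.add_zero] at hneg
      have hST2 : ((u :: q).foldl (pvOuter graph (d + 1)) (dist, [])).2 = [] :=
        List.length_eq_zero_iff.mp (by omega)
      rw [pvLoopB, pvLoopC_succ, hR2.mpr hST2, hR1]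
      rw [hST2, pvLoopB_nil]
      rfl
  | succ k ih =>
    intro dist F d fb fc hk hL hFs hFc hB0 hd hfb hfc
    obtain ⟨fc', rfl⟩ : ∃ fc', fc = fc' + 1 := ⟨fc - 1, by omega⟩
    obtain ⟨hR1, hR2, hR3⟩ := pvRound graph roads hg hrr HG dist F d hd hL hFs hFc hB0
    cases F with
    | nil =>
      rw [pvLoopB_nil, pvLoopC_succ, hR2.mpr rfl, hR1]
      rfl
    | cons u q =>
      obtain ⟨fb', rfl⟩ : ∃ fb', fb = fb' + 1 := ⟨fb - 1, by omega⟩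
      have hneg := pvLevel_neg (L := L) graph (d + 1) (u :: q) (dist, []) hg hL (by omega)
      simp only [List.length_nil, Nat.add_zero] at hneg
      by_cases hST2 : ((u :: q).foldl (pvOuter graph (d + 1)) (dist, [])).2 = []
      · rw [pvLoopB, pvLoopC_succ, hR2.mpr hST2, hR1]
        rw [hST2, pvLoopB_nil]
        rfl
      · have hflag : (roads.foldl (pvEdgeStep (d + 1)) (dist, false)).2 = true := by
          cases hfl : (roads.foldl (pvEdgeStep (d + 1)) (dist, false)).2
          · exact absurd (hR2.mp hfl) hST2
          · rfl
        rw [pvLoopB, pvLoopC_succ, hflag, hR1]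
        simp only [if_true]
        have hlen2 : 1 ≤ ((u :: q).foldl (pvOuter graph (d + 1)) (dist, [])).2.length :=
          List.length_pos_iff.mpr hST2
        have hLst : ((u :: q).foldl (pvOuter graph (d + 1)) (dist, [])).1.length = L := by
          rw [pvLevel_len]; exact hL
        have hmem := pvLevel_mem (L := L) graph (d + 1) (u :: q) (dist, []) hg hL (by omega)
          (by intro x hx; cases hx)
        have hcomp : ∀ j, j < L →
            ((u :: q).foldl (pvOuter graph (d + 1)) (dist, [])).1.getD j 0 = d + 1 →
            ∃ w ∈ ((u :: q).foldl (pvOuter graph (d + 1)) (dist, [])).2, pvIdx L w = j := by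
          intro j hj hv
          exact pvLevel_complete (L := L) graph (d + 1) (u :: q) hg (dist, []) hL
            (by
              intro j' hj' hv'
              exfalso
              have hv2 : dist.getD j' 0 = d + 1 := hv'
              rcases hB0 j' hj' with h | h <;> omega) j hj hv
        exact ih _ _ (d + 1) fb' fc' (by omega) hLst (fun w hw => hmem w hw) hcomp
          (fun j hj => hR3 j hj) (by omega) (by omega) (by omega)

-- membership characterization of one appended road in the adjacency structure
theorem pvAddEdge_mem {L : Nat} (g : List (List Int)) (hg : g.length = L) (a b u v : Int)
    (ha : pvInR L a) (hb : pvInR L b) (hu : pvInR L u) :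
    v ∈ PySem.List.pyGetD
        (PySem.List.pySetD (PySem.List.pySetD g a (PySem.List.pyGetD g a [] ++ [b])) b
          (PySem.List.pyGetD (PySem.List.pySetD g a (PySem.List.pyGetD g a [] ++ [b])) b [] ++ [a]))
        u []
    ↔ v ∈ PySem.List.pyGetD g u []
      ∨ (pvIdx L a = pvIdx L u ∧ v = b) ∨ (pvIdx L b = pvIdx L u ∧ v = a) := by
  have hga : PySem.List.pyGetD g a [] = g.getD (pvIdx L a) [] := pvGetDBridge g [] hg ha
  have hgu : PySem.List.pyGetD g u [] = g.getD (pvIdx L u) [] := pvGetDBridge g [] hg hu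
  have hset1 : PySem.List.pySetD g a (PySem.List.pyGetD g a [] ++ [b])
      = g.set (pvIdx L a) (g.getD (pvIdx L a) [] ++ [b]) := by
    rw [pvSetBridge g _ hg ha, hga]
  set g1 := g.set (pvIdx L a) (g.getD (pvIdx L a) [] ++ [b]) with hg1def
  have hg1len : g1.length = L := by rw [hg1def, List.length_set]; exact hg
  have hg1b : PySem.List.pyGetD g1 b [] = g1.getD (pvIdx L b) [] := pvGetDBridge g1 [] hg1len hb
  have hset2 : PySem.List.pySetD g1 b (PySem.List.pyGetD g1 b [] ++ [a])
      = g1.set (pvIdx L b) (g1.getD (pvIdx L b) [] ++ [a]) := by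
    rw [pvSetBridge g1 _ hg1len hb, hg1b]
  set g2 := g1.set (pvIdx L b) (g1.getD (pvIdx L b) [] ++ [a]) with hg2def
  have hg2len : g2.length = L := by rw [hg2def, List.length_set]; exact hg1len
  have hg2u : PySem.List.pyGetD g2 u [] = g2.getD (pvIdx L u) [] := pvGetDBridge g2 [] hg2len hu
  rw [hset1, hset2, hg2u, hgu]
  have hjg : pvIdx L u < g.length := by rw [hg]; exact pvIdx_lt hu
  have hjg1 : pvIdx L u < g1.length := by rw [hg1len]; exact pvIdx_lt hu
  rw [hg2def, pvGetDSet g1 (pvIdx L b) (pvIdx L u) _ [] hjg1]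
  by_cases hbu : pvIdx L b = pvIdx L u
  · rw [if_pos hbu]
    rw [hg1def, pvGetDSet g (pvIdx L a) (pvIdx L b) _ [] (by rw [hg]; exact pvIdx_lt hb)]
    by_cases hab : pvIdx L a = pvIdx L b
    · rw [if_pos hab]
      simp only [List.mem_append, List.mem_singleton]
      constructor
      · rintro ((h | h) | h)
        · left; rwa [(by rw [hab, hbu] : g.getD (pvIdx L a) ([] : List Int) = g.getD (pvIdx L u) [])] at h
        · right; left; exact ⟨by rw [hab, hbu], h⟩
        · right; right; exact ⟨hbu, h⟩
      · rintro (h | ⟨h1, h2⟩ | ⟨h1, h2⟩)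
        · left; left; rwa [(by rw [hab, hbu] : g.getD (pvIdx L a) ([] : List Int) = g.getD (pvIdx L u) [])]
        · left; right; exact h2
        · right; exact h2
    · rw [if_neg hab]
      simp only [List.mem_append, List.mem_singleton]
      constructor
      · rintro (h | h)
        · left; rwa [(by rw [hbu] : g.getD (pvIdx L b) ([] : List Int) = g.getD (pvIdx L u) [])] at h
        · right; right; exact ⟨hbu, h⟩
      · rintro (h | ⟨h1, h2⟩ | ⟨h1, h2⟩)
        · left; rwa [(by rw [hbu] : g.getD (pvIdx L b) ([] : List Int) = g.getD (pvIdx L u) [])]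
        · exact absurd (h1.trans hbu.symm) hab
        · right; exact h2
  · rw [if_neg hbu]
    rw [hg1def, pvGetDSet g (pvIdx L a) (pvIdx L u) _ [] hjg]
    by_cases hau : pvIdx L a = pvIdx L u
    · rw [if_pos hau]
      simp only [List.mem_append, List.mem_singleton]
      constructor
      · rintro (h | h)
        · left; rwa [(by rw [hau] : g.getD (pvIdx L a) ([] : List Int) = g.getD (pvIdx L u) [])] at h
        · right; left; exact ⟨hau, h⟩
      · rintro (h | ⟨h1, h2⟩ | ⟨h1, h2⟩)
        · left; rwa [(by rw [hau] : g.getD (pvIdx L a) ([] : List Int) = g.getD (pvIdx L u) [])]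
        · right; exact h2
        · exact absurd h1 hbu
    · rw [if_neg hau]
      constructor
      · intro h; left; exact h
      · rintro (h | ⟨h1, h2⟩ | ⟨h1, h2⟩)
        · exact h
        · exact absurd h1 hau
        · exact absurd h1 hbu

theorem pvBG_char {L : Nat} (roads : List (Int × Int))
    (hrr : ∀ r ∈ roads, pvInR L r.1 ∧ pvInR L r.2) :
    ∀ (g : List (List Int)) (P : Int → Int → Prop), g.length = L →
    (∀ u v, pvInR L u → (v ∈ PySem.List.pyGetD g u [] ↔ P u v)) →
    ∀ u v, pvInR L u →
    (v ∈ PySem.List.pyGetD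
        (roads.foldl (fun g r =>
          let g1 := PySem.List.pySetD g r.1 (PySem.List.pyGetD g r.1 [] ++ [r.2])
          PySem.List.pySetD g1 r.2 (PySem.List.pyGetD g1 r.2 [] ++ [r.1])) g) u []
      ↔ P u v ∨ ∃ r ∈ roads,
          (pvIdx L r.1 = pvIdx L u ∧ v = r.2) ∨ (pvIdx L r.2 = pvIdx L u ∧ v = r.1)) := by
  induction roads with
  | nil =>
    intro g P hg hP u v hu
    rw [List.foldl_nil]
    simp only [List.not_mem_nil, false_and, exists_false, or_false]
    exact hP u v hu
  | cons r roads ih =>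
    intro g P hg hP u v hu
    have hra := hrr r List.mem_cons_self
    rw [List.foldl_cons]
    have hstep := ih (fun r' hr' => hrr r' (List.mem_cons_of_mem _ hr'))
      (PySem.List.pySetD (PySem.List.pySetD g r.1 (PySem.List.pyGetD g r.1 [] ++ [r.2])) r.2
        (PySem.List.pyGetD (PySem.List.pySetD g r.1 (PySem.List.pyGetD g r.1 [] ++ [r.2])) r.2 [] ++ [r.1]))
      (fun u' v' => P u' v' ∨ (pvIdx L r.1 = pvIdx L u' ∧ v' = r.2) ∨ (pvIdx L r.2 = pvIdx L u' ∧ v' = r.1))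
      (by rw [PySem.List.length_pySetD, PySem.List.length_pySetD]; exact hg)
      (by
        intro u' v' hu'
        rw [pvAddEdge_mem g hg r.1 r.2 u' v' hra.1 hra.2 hu']
        constructor
        · rintro (h | h)
          · left; exact (hP u' v' hu').mp h
          · right; exact h
        · rintro (h | h)
          · left; exact (hP u' v' hu').mpr h
          · right; exact h)
      u v hu
    rw [hstep]
    simp only [List.mem_cons]
    constructor
    · rintro ((h | h) | ⟨r', hr', ht⟩)
      · left; exact h
      · right; exact ⟨r, Or.inl rfl, h⟩
      · right; exact ⟨r', Or.inr hr', ht⟩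
    · rintro (h | ⟨r', (rfl | hr'), ht⟩)
      · left; left; exact h
      · left; right; exact ht
      · right; exact ⟨r', hr', ht⟩

theorem solution_eq (n : Int) (roads : List (Int × Int)) (sources : List Int) (destination : Int)
    (hn : 0 ≤ n) (hr : ∀ r ∈ roads, -(n + 1) ≤ r.1 ∧ r.1 ≤ n ∧ -(n + 1) ≤ r.2 ∧ r.2 ≤ n)
    (hd0 : -(n + 1) ≤ destination) (hd1 : destination ≤ n) :
    solution n roads sources destination = solution_alt n roads sources destination := by
  unfold solution solution_alt
  simp only []
  set L := (n + 1).toNat with hLdef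
  have hcast : ((L : Nat) : Int) = n + 1 := by omega
  set D0 := PySem.List.pySetD (List.replicate L (-1 : Int)) destination 0 with hD0
  have hdest : pvInR L destination := ⟨by omega, by omega⟩
  have hL0 : D0.length = L := by
    rw [hD0, PySem.List.length_pySetD, List.length_replicate]
  have hg := pvBuildGraph_inR n roads hn hr
  have hrr : ∀ r ∈ roads, pvInR L r.1 ∧ pvInR L r.2 := by
    intro r hrm
    have := hr r hrm
    exact ⟨⟨by omega, by omega⟩, ⟨by omega, by omega⟩⟩
  have hfr : ∀ u ∈ [destination], pvInR L u := by
    intro u hu; simp at hu; subst hu; exact hdest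
  have hD0get : ∀ j, j < L → D0.getD j 0 = if pvIdx L destination = j then 0 else -1 := by
    intro j hj
    rw [hD0, pvSetBridge _ 0 List.length_replicate hdest,
      pvGetDSet _ (pvIdx L destination) j 0 0 (by rw [List.length_replicate]; exact hj)]
    split
    · rfl
    · rw [List.getD_eq_getElem _ 0 (by rw [List.length_replicate]; exact hj),
        List.getElem_replicate]
  have hval : ∀ u ∈ [destination], PySem.List.pyGetD D0 u 0 = 0 := by
    intro u hu; simp at hu; subst hu
    rw [pvGetDBridge D0 (0 : Int) hL0 hdest, hD0get _ (pvIdx_lt hdest), if_pos rfl]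
  have hnegle : pvNeg D0 + 1 ≤ L := by
    unfold pvNeg
    have hcnt : D0.countP (fun x => decide (x = -1)) + 1 ≤ D0.length := by
      have h1 : pvIdx L destination < D0.length := by rw [hL0]; exact pvIdx_lt hdest
      have h2 : ¬ (fun x => decide (x = -1)) (D0[pvIdx L destination]'h1) = true := by
        have := hD0get (pvIdx L destination) (pvIdx_lt hdest)
        rw [List.getD_eq_getElem _ 0 h1] at this
        rw [if_pos rfl] at this
        simp [this]
      have hlt : D0.countP (fun x => decide (x = -1)) < D0.length := by
        by_contra hge
        rw [not_lt] at hge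
        have hall := (List.countP_eq_length (p := fun x => decide (x = -1)) (l := D0)).mp
          (le_antisymm List.countP_le_length hge)
        exact h2 (hall _ (List.getElem_mem h1))
      omega
    rw [hL0] at hcnt
    exact hcnt
  have hmain := pvMain (L := L) (pvBuildGraph n roads) hg (pvNeg D0) D0 [destination] 0
    (L + 1) (L + 1) le_rfl hL0 hfr hval le_rfl (by simp; omega) (by omega)
  rw [hmain]
  have hHG := pvBG_char (L := L) roads hrr (List.replicate L ([] : List Int)) (fun _ _ => False)
    List.length_replicate
    (by
      intro u v hu
      rw [pvGetDBridge _ ([] : List Int) List.length_replicate hu,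
        List.getD_eq_getElem _ ([] : List Int) (by rw [List.length_replicate]; exact pvIdx_lt hu),
        List.getElem_replicate]
      simp)
  have hHG' : ∀ u v, pvInR L u → (v ∈ PySem.List.pyGetD (pvBuildGraph n roads) u [] ↔
      ∃ r ∈ roads, (pvIdx L r.1 = pvIdx L u ∧ v = r.2) ∨ (pvIdx L r.2 = pvIdx L u ∧ v = r.1)) := by
    intro u v hu
    have := hHG u v hu
    rw [pvBuildGraph]
    rw [this]
    simp
  have hFs : ∀ u ∈ [destination], pvInR L u ∧ PySem.List.pyGetD D0 u 0 = 0 := by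
    intro u hu
    exact ⟨hfr u hu, hval u hu⟩
  have hFc : ∀ j, j < L → D0.getD j 0 = 0 → ∃ u ∈ [destination], pvIdx L u = j := by
    intro j hj hv
    rw [hD0get j hj] at hv
    by_cases h : pvIdx L destination = j
    · exact ⟨destination, List.mem_singleton_self _, h⟩
    · rw [if_neg h] at hv; omega
  have hB0 : ∀ j, j < L → D0.getD j 0 = -1 ∨ (0 ≤ D0.getD j 0 ∧ D0.getD j 0 ≤ 0) := by
    intro j hj
    rw [hD0get j hj]
    split
    · right; omega
    · left; rfl
  have hmain2 := pvMain2 (L := L) (pvBuildGraph n roads) roads hg hrr hHG'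
    (pvNeg D0) D0 [destination] 0 (L + 1) (L + 1) le_rfl hL0 hFs hFc hB0 le_rfl
    (by omega) (by omega)
  rw [hmain2]
  rw [PySem.List.foldl_append_singleton_eq_map]
  simp

-- ===== VERDICT (by name: the statement is the Claim_ definition above) =====
theorem solution_spec : Claim_equal_solution := by
  intro n roads sources destination _hDom hPre
  unfold Spec_solution
  obtain ⟨hn, hr, _hs, hd0, hd1⟩ := hPre
  exact solution_eq n roads sources destination hn hr hd0 hd1
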